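-- pv_equiv track=rewrite | github.com/Thuto42096/uno-py | uno v3.py | can_play_card
-- ===== SOURCE A (Python) =====
-- def can_play_card(player_hand, discarded):
--     if not discarded:
--         return False
--
--     top_card = discarded[-1]
--     top_card_split = top_card.split(" ")
--     top_card_colour = top_card_split[0]
--     top_card_value = top_card_split[1] if len(top_card_split) > 1 else None
--
--     for card in player_hand:
--         card_split = card.split(" ")
--         card_colour = card_split[0]
--         card_value = card_split[1] if len(card_split) > 1 else None
--
--         # Wild cards can always be played
--         if card_colour in ["wild", "drawfour"]:
--             return True
--
--         # If top card is wild/drawfour, only color match or another wild/drawfour is valid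
--         if top_card_colour in ["wild", "drawfour"]:
--             continue  # Only wilds can be played on wilds
--
--         # Color or value match
--         if card_colour == top_card_colour or (card_value and card_value == top_card_value):
--             return True
--
--     return False
-- ===== SOURCE B (Python) =====
-- def can_play_card(player_hand, discarded):
--     if not discarded:
--         return False
--
--     def parts(card):
--         p = card.split(" ")
--         return p[0], (p[1] if len(p) > 1 else None)
--
--     # Pass 1: a wild/drawfour in hand is always playable.
--     if any(parts(c)[0] in ("wild", "drawfour") for c in player_hand):
--         return True
--
--     top_colour, top_value = parts(discarded[-1])
--     # No non-wild card ever matches a wild top.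
--     if top_colour in ("wild", "drawfour"):
--         return False
--
--     # Pass 2: colour or (truthy) value match.
--     return any(
--         colour == top_colour or (value and value == top_value)
--         for colour, value in map(parts, player_hand)
--     )
-- ===== Notes on version B (the rewrite author's own statement) =====
-- stated objective: simpler
-- what changed: Replaces A's single interleaved early-exit loop (wild check, wild-top continue and match test per iteration) with a decomposition: one pass for a wild card in hand, then an early False if the top card is wild, then one pass testing colour/value match.
import Mathlib
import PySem

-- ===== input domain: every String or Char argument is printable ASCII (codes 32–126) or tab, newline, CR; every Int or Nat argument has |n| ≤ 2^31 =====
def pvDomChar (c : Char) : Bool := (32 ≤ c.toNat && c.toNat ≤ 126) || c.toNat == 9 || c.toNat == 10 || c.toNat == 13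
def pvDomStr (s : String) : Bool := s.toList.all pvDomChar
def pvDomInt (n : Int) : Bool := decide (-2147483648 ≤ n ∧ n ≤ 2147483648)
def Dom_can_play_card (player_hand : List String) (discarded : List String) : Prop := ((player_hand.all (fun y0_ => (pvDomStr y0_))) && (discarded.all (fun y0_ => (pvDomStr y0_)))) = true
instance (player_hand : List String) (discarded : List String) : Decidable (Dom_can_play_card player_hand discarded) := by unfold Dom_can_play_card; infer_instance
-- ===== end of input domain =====

-- B replaces A's single interleaved early-exit loop by a wild-in-hand pass, a wild-top
-- short-circuit, and a separate colour/value matching pass (objective: simpler decomposition).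

-- ===== PORT A =====
-- A's for-loop with its early returns and `continue`, as structural recursion.
def canPlayLoop (topColour : String) (topValue : Option String) : List String → Bool
  | [] => false
  | card :: rest =>
    let cardSplit := (PySem.Str.split? card " ").getD []
    let cardColour := cardSplit.headD ""
    let cardValue := if cardSplit.length > 1 then some (cardSplit.getD 1 "") else none
    if cardColour == "wild" || cardColour == "drawfour" then true
    else if topColour == "wild" || topColour == "drawfour" then
      canPlayLoop topColour topValue rest
    else if cardColour == topColour
        || (match cardValue with
            | some v => decide (v ≠ "") && (some v == topValue)
            | none => false) then true
    else canPlayLoop topColour topValue rest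

def can_play_card (player_hand : List String) (discarded : List String) : Bool :=
  match discarded.getLast? with
  | none => false
  | some top_card =>
    let topSplit := (PySem.Str.split? top_card " ").getD []
    let topColour := topSplit.headD ""
    let topValue := if topSplit.length > 1 then some (topSplit.getD 1 "") else none
    canPlayLoop topColour topValue player_hand

-- ===== PORT B =====
def isWildB (colour : String) : Bool := colour == "wild" || colour == "drawfour"

def partsB (card : String) : String × Option String :=
  let p := (PySem.Str.split? card " ").getD []
  (p.headD "", if p.length > 1 then some (p.getD 1 "") else none)

def can_play_card_alt (player_hand : List String) (discarded : List String) : Bool :=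
  match discarded.getLast? with
  | none => false
  | some top =>
    if player_hand.any (fun c => isWildB (partsB c).1) then true
    else
      let tp := partsB top
      if isWildB tp.1 then false
      else
        player_hand.any (fun c =>
          let cp := partsB c
          (cp.1 == tp.1)
            || (match cp.2 with
                | some v => decide (v ≠ "") && (some v == tp.2)
                | none => false))

-- ===== PRECONDITION & SPEC =====
def Spec_can_play_card (player_hand : List String) (discarded : List String) (out : Bool) : Prop := out = can_play_card_alt player_hand discarded
instance (player_hand : List String) (discarded : List String) (out : Bool) : Decidable (Spec_can_play_card player_hand discarded out) := by unfold Spec_can_play_card; infer_instance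

-- ===== CLAIM (what is proved, stated in full; the proofs are below) =====
def Claim_equal_can_play_card : Prop := ∀ (player_hand : List String) (discarded : List String), Dom_can_play_card player_hand discarded → Spec_can_play_card player_hand discarded (can_play_card player_hand discarded)

-- ===== LEMMAS AND PROOFS =====
-- Characterisation of A's loop as B's three-stage decomposition.
theorem canPlayLoop_eq (tc : String) (tv : Option String) (hand : List String) :
    canPlayLoop tc tv hand =
      (if hand.any (fun c => isWildB (partsB c).1) then true
       else if isWildB tc then false
       else hand.any (fun c =>
          let cp := partsB c
          (cp.1 == tc)
            || (match cp.2 with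
                | some v => decide (v ≠ "") && (some v == tv)
                | none => false))) := by
  induction hand with
  | nil => cases h : isWildB tc <;> simp [canPlayLoop, h]
  | cons card rest ih =>
    simp only [isWildB, partsB] at ih ⊢
    simp only [canPlayLoop, List.any_cons]
    cases hW : (((PySem.Str.split? card " ").getD []).headD "" == "wild"
        || ((PySem.Str.split? card " ").getD []).headD "" == "drawfour") with
    | true => simp only [hW, Bool.true_or, if_true]
    | false =>
      cases hT : (tc == "wild" || tc == "drawfour") with
      | true => simp [hW, hT, ih]
      | false =>
        cases hM : ((((PySem.Str.split? card " ").getD []).headD "" == tc)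
            || (match (if ((PySem.Str.split? card " ").getD []).length > 1
                  then some (((PySem.Str.split? card " ").getD []).getD 1 "") else none) with
                | some v => decide (v ≠ "") && (some v == tv)
                | none => false)) with
        | true => simp [hW, hT, hM]
        | false => simp [hW, hT, hM, ih]

-- ===== VERDICT (by name: the statement is the Claim_ definition above) =====
theorem can_play_card_spec : Claim_equal_can_play_card := by
  intro player_hand discarded _
  unfold Spec_can_play_card can_play_card can_play_card_alt
  cases discarded.getLast? with
  | none => rfl
  | some top => exact canPlayLoop_eq (partsB top).1 (partsB top).2 player_hand
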